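-- pv_equiv track=rewrite | github.com/VIVelev/sketchy-code | src/utils/sequence.py | tokenize_html_code
-- ===== SOURCE A (Python) =====
-- def tokenize_html_code(code):
--     html_tags = []
--     closing_bound = 0
--
--     while True:
--         closing_idx = code.find('>', closing_bound)
--         if closing_idx == -1:
--             break
--
--         tag = code[closing_bound:closing_idx+1]
--         tag = tag[tag.find('<'):tag.find('>')+1]
--
--         html_tags.append(tag)
--         closing_bound = closing_idx+1
--
--     return html_tags
-- ===== SOURCE B (Python) =====
-- def tokenize_html_code(code):
--     tags = []
--     tag = ''  # pending token text: a token starts at '<' (or at a bare '>') and ends at '>'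
--     for ch in code:
--         if tag:
--             tag += ch
--         elif ch in '<>':
--             tag = ch
--         if ch == '>':
--             tags.append(tag)
--             tag = ''
--     return tags
-- ===== Notes on version B (the rewrite author's own statement) =====
-- stated objective: simpler
-- what changed: Replaced the while-loop that repeatedly searches the whole string for the next closing bracket and re-slices it by index with a single left-to-right character scan that accumulates the pending token (started by an opening bracket, or by the closing bracket itself when none is open) and emits it at each closing bracket.
import Mathlib
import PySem

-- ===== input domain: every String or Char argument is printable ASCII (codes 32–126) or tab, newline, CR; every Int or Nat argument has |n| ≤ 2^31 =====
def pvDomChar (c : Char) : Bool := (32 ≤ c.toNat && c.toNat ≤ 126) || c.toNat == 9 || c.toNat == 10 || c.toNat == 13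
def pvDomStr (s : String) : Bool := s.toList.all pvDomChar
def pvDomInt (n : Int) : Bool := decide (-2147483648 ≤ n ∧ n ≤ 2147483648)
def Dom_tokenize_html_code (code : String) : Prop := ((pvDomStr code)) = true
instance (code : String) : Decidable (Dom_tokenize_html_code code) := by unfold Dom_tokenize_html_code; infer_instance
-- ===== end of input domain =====

-- B replaces A's advancing find('>')-index while-loop over the whole string by a
-- single-pass character scanner with one pending-token accumulator (objective: simpler).

-- ===== PORT A =====
-- A's while-loop: fuel = |code| + 1 bounds the iterations (each one advances closing_bound by at least 1);
-- the fuel-0 branch is never reached, proved in the lemmas below.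
def tokA_loop : Nat → List Char → Nat → List String → List String
  | 0, _, _, acc => acc
  | fuel+1, cs, bound, acc =>
    let idx := PySem.Chars.findFrom cs ['>'] (bound : Int) none
    if idx = -1 then acc
    else
      let tag := PySem.List.slice cs (some (bound : Int)) (some (idx + 1))
      let tag2 := PySem.List.slice tag (some (PySem.Chars.find tag ['<'])) (some (PySem.Chars.find tag ['>'] + 1))
      tokA_loop fuel cs (idx.toNat + 1) (acc ++ [String.ofList tag2])

def tokenize_html_code (code : String) : List String :=
  tokA_loop (code.toList.length + 1) code.toList 0 []

-- ===== PORT B =====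
-- one step of Source B's for-loop: state = (tags, pending token text)
def tokB_step (st : List String × List Char) (ch : Char) : List String × List Char :=
  let tag' := if st.2 ≠ [] then st.2 ++ [ch]
              else if ch = '<' ∨ ch = '>' then [ch] else []
  if ch = '>' then (st.1 ++ [String.ofList tag'], []) else (st.1, tag')

def tokenize_html_code_alt (code : String) : List String :=
  (code.toList.foldl tokB_step ([], [])).1

-- ===== PRECONDITION & SPEC =====
def Spec_tokenize_html_code (code : String) (out : List String) : Prop := out = tokenize_html_code_alt code
instance (code : String) (out : List String) : Decidable (Spec_tokenize_html_code code out) := by unfold Spec_tokenize_html_code; infer_instance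

-- ===== CLAIM (what is proved, stated in full; the proofs are below) =====
def Claim_equal_tokenize_html_code : Prop := ∀ (code : String), Dom_tokenize_html_code code → Spec_tokenize_html_code code (tokenize_html_code code)

-- ===== LEMMAS AND PROOFS =====

-- proof-side reference versions of single-char find and split
def findC (c : Char) : List Char → Int
  | [] => -1
  | x :: rest => if x = c then 0 else (if findC c rest = -1 then -1 else findC c rest + 1)

def split1 (c : Char) : List Char → List (List Char)
  | [] => [[]]
  | x :: rest => if x = c then [] :: split1 c rest else (split1 c rest).modifyHead (x :: ·)

def procB (part : List Char) : String :=
  if findC '<' part = -1 then ">" else String.ofList (part.drop (findC '<' part).toNat ++ ['>'])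

theorem findC_ge (c : Char) (t : List Char) : -1 ≤ findC c t := by
  induction t with
  | nil => simp [findC]
  | cons x rest ih => simp only [findC]; split_ifs <;> omega

theorem findgo_eq (c : Char) (t : List Char) (k : Nat) :
    PySem.Chars.find.go [c] t k = if findC c t = -1 then -1 else k + findC c t := by
  induction t generalizing k with
  | nil => simp [PySem.Chars.find.go, findC]
  | cons x rest ih =>
    have hge := findC_ge c rest
    by_cases hx : x = c
    · simp [PySem.Chars.find.go, List.isPrefixOf, hx, findC]
    · have hcx : (c == x) = false := by simp; exact fun h => hx h.symm
      simp only [PySem.Chars.find.go, List.isPrefixOf, hcx,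
        Bool.and_true, Bool.false_eq_true, if_false, ih (k+1), findC, hx]
      by_cases hr : findC c rest = -1
      · simp [hr]
      · rw [if_neg hr, if_neg hr, if_neg (by omega)]
        push_cast; ring

theorem find_eq_findC (c : Char) (t : List Char) :
    PySem.Chars.find t [c] = findC c t := by
  have h := findgo_eq c t 0
  simp only [PySem.Chars.find] at *
  rw [h]; split_ifs with h1 <;> omega

theorem findC_neg_iff (c : Char) (t : List Char) : findC c t = -1 ↔ c ∉ t := by
  induction t with
  | nil => simp [findC]
  | cons x rest ih =>
    have hge := findC_ge c rest
    by_cases hx : x = c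
    · simp [findC, hx]
    · have hcx : c ≠ x := fun h => hx h.symm
      simp only [findC, hx, if_false, List.mem_cons, not_or]
      by_cases hr : findC c rest = -1
      · simp [hr, ih.mp hr, hcx]
      · have hmem : c ∈ rest := by by_contra hm; exact hr (ih.mpr hm)
        rw [if_neg hr]
        constructor
        · intro h'; exact absurd h' (by omega)
        · intro h2; exact absurd hmem h2.2

theorem findC_append (c : Char) (a b : List Char) (h : c ∉ a) :
    findC c (a ++ c :: b) = a.length := by
  induction a with
  | nil => simp [findC]
  | cons x rest ih =>
    simp only [List.mem_cons, not_or] at h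
    have hx : x ≠ c := fun h' => h.1 h'.symm
    have hrec := ih h.2
    simp only [List.cons_append, findC, hx, if_false, hrec, List.length_cons]
    rw [if_neg (by omega)]
    push_cast; ring

theorem findC_decomp (c : Char) (t : List Char) (h : findC c t ≠ -1) :
    ∃ a b, c ∉ a ∧ t = a ++ c :: b ∧ findC c t = a.length := by
  induction t with
  | nil => simp [findC] at h
  | cons x rest ih =>
    by_cases hx : x = c
    · exact ⟨[], rest, by simp, by simp [hx], by simp [findC, hx]⟩
    · have hr : findC c rest ≠ -1 := by
        intro h0; apply h; simp [findC, hx, h0]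
      obtain ⟨a, b, ha, hab, hfa⟩ := ih hr
      refine ⟨x :: a, b, ?_, by simp [hab], ?_⟩
      · simp only [List.mem_cons, not_or]
        exact ⟨fun h' => hx h'.symm, ha⟩
      · simp only [findC, hx, if_false, hfa, List.length_cons]
        rw [if_neg (show (a.length : Int) ≠ -1 by omega)]
        push_cast; ring

theorem split1_ne_nil (c : Char) (t : List Char) : split1 c t ≠ [] := by
  induction t with
  | nil => simp [split1]
  | cons x rest ih =>
    simp only [split1]
    split_ifs
    · simp
    · cases hs : split1 c rest with
      | nil => exact absurd hs ih
      | cons y ys => simp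

theorem split1_exists_cons (c : Char) (t : List Char) : ∃ h tl, split1 c t = h :: tl := by
  cases hs : split1 c t with
  | nil => exact absurd hs (split1_ne_nil c t)
  | cons y ys => exact ⟨y, ys, rfl⟩

theorem split1_not_mem (c : Char) (t : List Char) (h : c ∉ t) : split1 c t = [t] := by
  induction t with
  | nil => simp [split1]
  | cons x rest ih =>
    simp only [List.mem_cons, not_or] at h
    have hx : x ≠ c := fun h' => h.1 h'.symm
    simp [split1, hx, ih h.2]

theorem split1_append (c : Char) (a b : List Char) (h : c ∉ a) :
    split1 c (a ++ c :: b) = a :: split1 c b := by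
  induction a with
  | nil => simp [split1]
  | cons x rest ih =>
    simp only [List.mem_cons, not_or] at h
    have hx : x ≠ c := fun h' => h.1 h'.symm
    simp [split1, hx, ih h.2]

-- A's per-segment slicing equals procB on the '>'-free prefix
theorem tag_slice_eq (a : List Char) (ha : '>' ∉ a) :
    PySem.List.slice (a ++ ['>'])
      (some (PySem.Chars.find (a ++ ['>']) ['<']))
      (some (PySem.Chars.find (a ++ ['>']) ['>'] + 1))
      = (procB a).toList := by
  have hgt : PySem.Chars.find (a ++ ['>']) ['>'] = a.length := by
    rw [find_eq_findC]; exact findC_append '>' a [] ha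
  have hlen : (a ++ ['>']).length = a.length + 1 := by simp
  by_cases hlt : findC '<' a = -1
  · have hnm : '<' ∉ a := (findC_neg_iff '<' a).mp hlt
    have hnm2 : '<' ∉ a ++ ['>'] := by simp [hnm]
    have hfind : PySem.Chars.find (a ++ ['>']) ['<'] = -1 := by
      rw [find_eq_findC]; exact (findC_neg_iff _ _).mpr hnm2
    rw [hfind, hgt]
    have hstop : (a.length : Int) + 1 = ((a.length + 1 : Nat) : Int) := by push_cast; ring
    rw [hstop]
    simp only [PySem.List.slice, PySem.List.clampIdx_neg_one, PySem.List.clampIdx_natCast, hlen,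
      min_self]
    have h1 : a.length + 1 - 1 = a.length := by omega
    rw [h1, List.drop_left' rfl]
    have h3 : a.length + 1 - a.length = 1 := by omega
    rw [h3]
    unfold procB
    rw [if_pos hlt]
    decide
  · obtain ⟨p, q, hp, hpq, hfp⟩ := findC_decomp '<' a hlt
    have hfind : PySem.Chars.find (a ++ ['>']) ['<'] = p.length := by
      rw [find_eq_findC, hpq, List.append_assoc, List.cons_append]
      exact findC_append '<' p (q ++ ['>']) hp
    rw [hfind, hgt]
    have hple : p.length ≤ a.length := by
      rw [hpq]; simp
    have hstop : (a.length : Int) + 1 = ((a.length + 1 : Nat) : Int) := by push_cast; ring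
    rw [hstop, PySem.List.slice_natCast]
    have hdrop : (a ++ ['>']).drop p.length = a.drop p.length ++ ['>'] :=
      List.drop_append_of_le_length hple
    rw [hdrop]
    have htake : (a.length + 1 - p.length) = (a.drop p.length ++ ['>']).length := by
      simp; omega
    rw [htake, List.take_length]
    unfold procB
    rw [if_neg hlt, hfp]
    simp

theorem loop_eq (fuel : Nat) : ∀ (cs : List Char) (bound : Nat) (acc : List String),
    bound ≤ cs.length → cs.length - bound < fuel →
    tokA_loop fuel cs bound acc
      = acc ++ ((split1 '>' (cs.drop bound)).dropLast).map procB := by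
  induction fuel with
  | zero => intro cs bound acc h1 h2; omega
  | succ fuel ih =>
    intro cs bound acc h1 h2
    rw [tokA_loop]
    rw [PySem.Chars.findFrom_natCast cs ['>'] bound h1]
    by_cases hf : PySem.Chars.find (cs.drop bound) ['>'] = -1
    · rw [if_pos (by rw [hf]; simp)]
      have hnm : '>' ∉ cs.drop bound := (findC_neg_iff _ _).mp (by rw [← find_eq_findC]; exact hf)
      rw [split1_not_mem _ _ hnm]
      simp
    · obtain ⟨a, b, ha, hab, hfa⟩ := findC_decomp '>' (cs.drop bound) (by rw [← find_eq_findC]; exact hf)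
      rw [find_eq_findC, hfa]
      have hcond : ((a.length : Int) ≠ -1) := by omega
      simp only [if_neg hcond]
      rw [if_neg (by omega)]
      have hlen : (cs.drop bound).length = a.length + 1 + b.length := by
        rw [hab]; simp; omega
      have hblen : bound + a.length + 1 ≤ cs.length := by
        have := List.length_drop (l := cs) (i := bound); omega
      have htoNat : ((bound : Int) + a.length).toNat = bound + a.length := by omega
      have hslice : PySem.List.slice cs (some (bound : Int)) (some ((bound : Int) + a.length + 1))
          = a ++ ['>'] := by
        have hs1 : (bound : Int) + a.length + 1 = ((bound + a.length + 1 : Nat) : Int) := by push_cast; ring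
        rw [hs1, PySem.List.slice_natCast]
        have h3 : bound + a.length + 1 - bound = a.length + 1 := by omega
        rw [h3]
        have h4 : List.drop bound cs = (a ++ ['>']) ++ b := by
          rw [hab]; simp
        rw [h4, List.take_left' (by simp)]
      rw [hslice, tag_slice_eq a ha]
      have hstep := ih cs (bound + a.length + 1) (acc ++ [String.ofList (procB a).toList])
        hblen (by omega)
      rw [htoNat, hstep]
      have hdrop2 : cs.drop (bound + a.length + 1) = b := by
        have h4 : List.drop bound cs = (a ++ ['>']) ++ b := by rw [hab]; simp
        have h5 : List.drop (bound + (a.length + 1)) cs = (List.drop bound cs).drop (a.length + 1) := by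
          rw [List.drop_drop, Nat.add_comm]
        have : bound + a.length + 1 = bound + (a.length + 1) := by omega
        rw [this, h5, h4, List.drop_left' (by simp)]
      rw [hdrop2, hab, split1_append '>' a b ha]
      obtain ⟨hd, tl, hs⟩ := split1_exists_cons '>' b
      simp [hs]

-- ===== B-side lemmas: the scanner emits procB of each '>'-terminated segment =====

-- while no '>' is read, nothing is emitted
theorem scan_no_emit (cs : List Char) (h : '>' ∉ cs) :
    ∀ (tags : List String) (tag : List Char), (cs.foldl tokB_step (tags, tag)).1 = tags := by
  induction cs with
  | nil => intro tags tag; rfl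
  | cons x rest ih =>
    intro tags tag
    simp only [List.mem_cons, not_or] at h
    have hx : x ≠ '>' := fun h' => h.1 h'.symm
    simp only [List.foldl_cons, tokB_step, if_neg hx]
    exact ih h.2 tags _

-- with a nonempty pending tag, the scanner appends every char up to and including the next '>'
theorem scan_pending (a : List Char) (ha : '>' ∉ a) :
    ∀ (b : List Char) (tags : List String) (tag : List Char), tag ≠ [] →
    ((a ++ '>' :: b).foldl tokB_step (tags, tag))
      = (b.foldl tokB_step (tags ++ [String.ofList (tag ++ a ++ ['>'])], [])) := by
  induction a with
  | nil =>
    intro b tags tag htag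
    simp only [List.nil_append, List.foldl_cons, tokB_step, if_pos htag]
    simp
  | cons x rest ih =>
    intro b tags tag htag
    simp only [List.mem_cons, not_or] at ha
    have hx : x ≠ '>' := fun h' => ha.1 h'.symm
    simp only [List.cons_append, List.foldl_cons, tokB_step, if_pos htag, if_neg hx]
    rw [ih ha.2 b tags (tag ++ [x]) (by simp)]
    simp

-- with no pending tag, chars other than '<' and '>' are skipped
theorem scan_skip (p : List Char) (h1 : '<' ∉ p) (h2 : '>' ∉ p) :
    ∀ (rest : List Char) (tags : List String),
    ((p ++ rest).foldl tokB_step (tags, [])) = (rest.foldl tokB_step (tags, [])) := by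
  induction p with
  | nil => intro rest tags; rfl
  | cons x xs ih =>
    intro rest tags
    simp only [List.mem_cons, not_or] at h1 h2
    have hx1 : x ≠ '<' := fun h' => h1.1 h'.symm
    have hx2 : x ≠ '>' := fun h' => h2.1 h'.symm
    simp only [List.cons_append, List.foldl_cons, tokB_step, if_neg hx2]
    simp only [ne_eq, not_true_eq_false, if_false, if_neg (by tauto : ¬(x = '<' ∨ x = '>'))]
    exact ih h1.2 h2.2 rest tags

-- one full segment: from the empty state, consuming a '>'-free prefix a and its '>' emits procB a
theorem scan_seg (a : List Char) (ha : '>' ∉ a) (b : List Char) (tags : List String) :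
    ((a ++ '>' :: b).foldl tokB_step (tags, []))
      = (b.foldl tokB_step (tags ++ [procB a], [])) := by
  by_cases hlt : findC '<' a = -1
  · have hnm : '<' ∉ a := (findC_neg_iff '<' a).mp hlt
    rw [scan_skip a hnm ha ('>' :: b) tags]
    simp only [List.foldl_cons, tokB_step, ne_eq, not_true_eq_false, if_false]
    unfold procB
    rw [if_pos hlt]
    rfl
  · obtain ⟨p, q, hp, hpq, hfp⟩ := findC_decomp '<' a hlt
    have hpgt : '>' ∉ p := by rw [hpq] at ha; simp at ha; tauto
    have hqgt : '>' ∉ q := by rw [hpq] at ha; simp at ha; tauto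
    have hsplit : a ++ '>' :: b = p ++ ('<' :: (q ++ '>' :: b)) := by rw [hpq]; simp
    rw [hsplit, scan_skip p hp hpgt _ tags]
    simp only [List.foldl_cons, tokB_step, ne_eq, not_true_eq_false, if_false,
      if_neg (by decide : ¬('<' : Char) = '>')]
    simp only [true_or, if_true]
    rw [scan_pending q hqgt b tags ['<'] (by simp)]
    unfold procB
    rw [if_neg hlt, hfp]
    have hdrop : a.drop (Int.toNat (p.length : Int)) = '<' :: q := by
      rw [hpq]
      simp
    rw [hdrop]
    simp

-- the scanner over the whole string = procB mapped over the '>'-terminated segments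
theorem scan_eq (n : Nat) : ∀ (cs : List Char), cs.length ≤ n → ∀ (tags : List String),
    (cs.foldl tokB_step (tags, [])).1 = tags ++ ((split1 '>' cs).dropLast).map procB := by
  induction n with
  | zero =>
    intro cs h tags
    have : cs = [] := by simpa using List.length_eq_zero_iff.mp (Nat.le_zero.mp h)
    subst this
    simp [split1]
  | succ n ih =>
    intro cs h tags
    by_cases hf : findC '>' cs = -1
    · have hnm : '>' ∉ cs := (findC_neg_iff _ _).mp hf
      rw [scan_no_emit cs hnm tags [], split1_not_mem _ _ hnm]
      simp
    · obtain ⟨a, b, ha, hab, _⟩ := findC_decomp '>' cs hf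
      subst hab
      rw [scan_seg a ha b tags]
      have hblen : b.length ≤ n := by
        have := h; simp [List.length_append] at this; omega
      rw [ih b hblen (tags ++ [procB a]), split1_append '>' a b ha]
      obtain ⟨hd, tl, hs⟩ := split1_exists_cons '>' b
      simp [hs]

theorem B_eq (code : String) :
    tokenize_html_code_alt code = ((split1 '>' code.toList).dropLast).map procB := by
  unfold tokenize_html_code_alt
  rw [scan_eq code.toList.length code.toList le_rfl []]
  simp

-- ===== VERDICT (by name: the statement is the Claim_ definition above) =====
theorem tokenize_html_code_spec : Claim_equal_tokenize_html_code := by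
  intro code _
  unfold Spec_tokenize_html_code tokenize_html_code
  rw [loop_eq (code.toList.length + 1) code.toList 0 [] (by omega) (by omega)]
  rw [B_eq]
  simp
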